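-- pv_equiv track=rewrite | github.com/vadim-zyamalov/project-euler | Problems 851-900/p872.py | f
-- ===== SOURCE A (Python) =====
-- def f(n, k):
--     powers = f"{n - k:b}"
--
--     res = n
--     nxt = n
--
--     for i, p in enumerate(powers[::-1]):
--         p = int(p)
--         if p:
--             nxt -= 2**i
--             res += nxt
--
--     return res
-- ===== SOURCE B (Python) =====
-- def f(n, k):
--     s = f"{n - k:b}"
--     total = 0
--     w = 1
--     for idx, c in enumerate(s):
--         if int(c):
--             total += w * 2 ** (len(s) - 1 - idx)
--             w += 1
--     return w * n - total
-- ===== Notes on version B (the rewrite author's own statement) =====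
-- stated objective: alternative
-- what changed: B replaces A's running-subtraction accumulation (LSB-first, updating nxt and adding it into res per set bit) by an MSB-first pass that builds a single weighted sum of bit values with increasing weights and returns the closed combination w*n - total.
import Mathlib
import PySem

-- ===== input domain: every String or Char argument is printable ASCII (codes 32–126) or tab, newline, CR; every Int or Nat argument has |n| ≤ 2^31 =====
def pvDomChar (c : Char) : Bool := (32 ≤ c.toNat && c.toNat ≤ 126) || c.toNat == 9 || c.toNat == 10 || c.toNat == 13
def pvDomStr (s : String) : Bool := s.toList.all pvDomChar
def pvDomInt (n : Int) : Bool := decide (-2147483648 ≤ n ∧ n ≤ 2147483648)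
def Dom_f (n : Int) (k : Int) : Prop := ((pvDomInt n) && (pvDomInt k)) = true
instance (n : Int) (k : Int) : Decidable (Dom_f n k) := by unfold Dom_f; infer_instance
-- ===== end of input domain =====

-- B reformulates A's running-subtraction accumulation as one MSB-first weighted sum
-- combined with a closed formula w*n - total (objective: alternative decomposition).

-- ===== PORT A =====
-- f"{m:b}" for m ≥ 0, reversed (LSB first), each char as its bit; exact on m ≥ 0
-- (Nat.bits gives the LSB-first bit list; for m = 0 Python's '0' bit is a no-op in the loop).
def pyBinRev (m : Int) : List Bool := Nat.bits m.toNat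

-- the 'for i, p in enumerate(powers[::-1])' loop, state (res, nxt), index i
def fLoop : List Bool → Nat → Int → Int → Int
  | [], _, res, _ => res
  | p :: rest, i, res, nxt =>
    if p then fLoop rest (i + 1) (res + (nxt - 2 ^ i)) (nxt - 2 ^ i)
    else fLoop rest (i + 1) res nxt

def f (n : Int) (k : Int) : Int :=
  fLoop (pyBinRev (n - k)) 0 n n

-- ===== PORT B =====
-- f"{m:b}" MSB first, exact on m ≥ 0 (same bit source as A's helper, un-reversed)
def pyBin (m : Int) : List Bool := (Nat.bits m.toNat).reverse

-- the 'for idx, c in enumerate(s)' loop, state (total, w)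
def fAltLoop : List Bool → Nat → Nat → Int → Int → Int × Int
  | [], _, _, total, w => (total, w)
  | c :: rest, idx, len, total, w =>
    if c then fAltLoop rest (idx + 1) len (total + w * 2 ^ (len - 1 - idx)) (w + 1)
    else fAltLoop rest (idx + 1) len total w

def f_alt (n : Int) (k : Int) : Int :=
  let s := pyBin (n - k)
  let tw := fAltLoop s 0 s.length 0 1
  tw.2 * n - tw.1

-- ===== PRECONDITION & SPEC =====
-- Pre_: Python A raises ValueError (int('-')) whenever n - k < 0; both programs raise there.
def Pre_f (n : Int) (k : Int) : Prop := k ≤ n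
instance (n : Int) (k : Int) : Decidable (Pre_f n k) := by unfold Pre_f; infer_instance
def pvWitness_f : Int × Int := (13, 5)

def Spec_f (n : Int) (k : Int) (out : Int) : Prop := out = f_alt n k
instance (n : Int) (k : Int) (out : Int) : Decidable (Spec_f n k out) := by unfold Spec_f; infer_instance

-- ===== CLAIM (what is proved, stated in full; the proofs are below) =====
def Claim_equal_f : Prop := ∀ (n : Int) (k : Int), Dom_f n k → Pre_f n k → Spec_f n k (f n k)

-- ===== LEMMAS AND PROOFS =====

-- number of set bits
def bcnt : List Bool → Int
  | [] => 0
  | b :: L => bcnt L + if b then 1 else 0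

-- numeric value of an LSB-first bit list
def bval : List Bool → Int
  | [] => 0
  | b :: L => 2 * bval L + if b then 1 else 0

-- weighted sum: the u-th set bit counting from the LSB (u = 1..c) weighs (c+1-u)·2^pos
def bwsum : List Bool → Int
  | [] => 0
  | b :: L => 2 * bwsum L + if b then bcnt L + 1 else 0

theorem fLoop_closed (L : List Bool) : ∀ (i : Nat) (res nxt : Int),
    fLoop L i res nxt = res + bcnt L * nxt - 2 ^ i * bwsum L := by
  induction L with
  | nil => intro i res nxt; simp [fLoop, bcnt, bwsum]
  | cons b L ih =>
    intro i res nxt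
    cases b <;> simp [fLoop, ih, bcnt, bwsum, pow_succ] <;> ring

theorem fAltLoop_snoc (M : List Bool) : ∀ (b : Bool) (idx len : Nat) (total w : Int),
    fAltLoop (M ++ [b]) idx len total w =
      (fun p : Int × Int =>
        if b then (p.1 + p.2 * 2 ^ (len - 1 - (idx + M.length)), p.2 + 1) else p)
        (fAltLoop M idx len total w) := by
  induction M with
  | nil => intro b idx len total w; cases b <;> simp [fAltLoop]
  | cons c M ih =>
    intro b idx len total w
    have h : idx + 1 + M.length = idx + (M.length + 1) := by omega
    cases c <;> simp [fAltLoop, ih, h]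

theorem fAltLoop_rev (L : List Bool) : ∀ (idx len : Nat) (total w : Int),
    idx + L.length ≤ len →
    fAltLoop L.reverse idx len total w =
      (total + 2 ^ (len - (idx + L.length)) * ((w - 1) * bval L + bwsum L), w + bcnt L) := by
  induction L with
  | nil => intro idx len total w _; simp [fAltLoop, bval, bwsum, bcnt]
  | cons b L ih =>
    intro idx len total w h
    simp only [List.length_cons] at h
    simp only [List.reverse_cons, fAltLoop_snoc, List.length_reverse]
    rw [ih idx len total w (by omega)]
    have hlen : len - (idx + L.length) = (len - (idx + (L.length + 1))) + 1 := by omega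
    have hexp : len - 1 - (idx + L.length) = len - (idx + (L.length + 1)) := by omega
    cases b <;>
      simp only [bval, bwsum, bcnt, List.length_cons, hlen, hexp, pow_succ,
        if_pos, Bool.false_eq_true, if_neg, not_false_iff, Prod.mk.injEq] <;>
      constructor <;> ring

theorem f_spec : Claim_equal_f := by
  intro n k _ _
  unfold Spec_f
  simp only [f, f_alt, pyBin, pyBinRev, List.length_reverse]
  rw [fLoop_closed, fAltLoop_rev (Nat.bits (n - k).toNat) 0 _ 0 1 (by omega)]
  simp only [Nat.zero_add, Nat.sub_self, pow_zero]
  ring
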